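-- pv_equiv track=rewrite | github.com/keerthirajsivashankar/My_Python_Solutions | Medium/3392.py | countSubarrays
-- ===== SOURCE A (Python) =====
-- from typing import List
--
-- def countSubarrays(nums: List[int]) -> int:
--   """
--   Counts the number of arithmetic subarrays of length 3 in the given list.
--
--   An arithmetic subarray of length 3 is a contiguous subarray [a, b, c]
--   where b - a == c - b, which is equivalent to b == (a + c) / 2
--   or b * 2 == a + c.
--
--   Args:
--       nums: A list of integers.
--
--   Returns:
--       The number of arithmetic subarrays of length 3.
--   """
--   count = 0
--   for i in range(len(nums) - 2):
--     a = nums[i]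
--     b = nums[i + 1]
--     c = nums[i + 2]
--     if b * 2 == a + c:
--       count += 1
--   return count
-- ===== SOURCE B (Python) =====
-- from typing import List
--
-- def countSubarrays(nums: List[int]) -> int:
--   # Build the consecutive-difference list, then count adjacent equal differences.
--   diffs = [b - a for a, b in zip(nums, nums[1:])]
--   return sum(1 for x, y in zip(diffs, diffs[1:]) if x == y)
-- ===== Notes on version B (the rewrite author's own statement) =====
-- stated objective: alternative
-- what changed: B first materialises the consecutive-difference list and counts adjacent equal differences in it, instead of A's index loop testing the three-element window condition b*2 == a+c.
import Mathlib
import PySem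

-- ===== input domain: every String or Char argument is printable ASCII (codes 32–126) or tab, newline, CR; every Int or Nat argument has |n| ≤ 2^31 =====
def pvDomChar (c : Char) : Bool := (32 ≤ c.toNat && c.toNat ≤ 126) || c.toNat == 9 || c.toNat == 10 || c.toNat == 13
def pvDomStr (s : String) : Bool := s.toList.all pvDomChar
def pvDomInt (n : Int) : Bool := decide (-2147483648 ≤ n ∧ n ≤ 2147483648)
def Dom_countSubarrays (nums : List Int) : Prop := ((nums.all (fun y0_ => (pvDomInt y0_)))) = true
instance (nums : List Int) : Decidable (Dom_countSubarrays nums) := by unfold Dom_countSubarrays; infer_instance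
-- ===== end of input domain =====

-- B builds the consecutive-difference list and counts adjacent equal entries, instead of A's indexed loop testing the three-element window condition; alternative decomposition, same cost.


-- ===== PORT A =====
def countSubarrays (nums : List Int) : Int :=
  (PySem.List.pyRange 0 ((nums.length : Int) - 2) 1).foldl
    (fun count i =>
      let a := PySem.List.pyGetD nums i 0
      let b := PySem.List.pyGetD nums (i + 1) 0
      let c := PySem.List.pyGetD nums (i + 2) 0
      if b * 2 = a + c then count + 1 else count) 0

-- ===== PORT B =====
def countSubarrays_alt (nums : List Int) : Int :=
  let diffs := (nums.zip (PySem.List.slice nums (some 1) none)).map (fun p => p.2 - p.1)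
  ((diffs.zip (PySem.List.slice diffs (some 1) none)).map
    (fun p => if p.1 = p.2 then (1 : Int) else 0)).sum

-- ===== PRECONDITION & SPEC =====
def Spec_countSubarrays (nums : List Int) (out : Int) : Prop := out = countSubarrays_alt nums
instance (nums : List Int) (out : Int) : Decidable (Spec_countSubarrays nums out) := by unfold Spec_countSubarrays; infer_instance

-- ===== CLAIM (what is proved, stated in full; the proofs are below) =====
def Claim_equal_countSubarrays : Prop := ∀ (nums : List Int), Dom_countSubarrays nums → Spec_countSubarrays nums (countSubarrays nums)

-- ===== LEMMAS AND PROOFS =====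

-- Reference recursion over three-element windows; both ports are proved equal to it.
def pvAux : List Int → Int
  | a :: b :: c :: rest => (if b * 2 = a + c then 1 else 0) + pvAux (b :: c :: rest)
  | _ => 0

-- A's loop body as a predicate on the index.
def pvP (nums : List Int) (i : Int) : Bool :=
  decide (PySem.List.pyGetD nums (i + 1) 0 * 2 = PySem.List.pyGetD nums i 0 + PySem.List.pyGetD nums (i + 2) 0)

lemma A_count (nums : List Int) :
    countSubarrays nums
      = ((PySem.List.pyRange 0 ((nums.length : Int) - 2) 1).countP (pvP nums) : Int) := by
  have h := PySem.List.foldl_count_if (pvP nums) (PySem.List.pyRange 0 ((nums.length : Int) - 2) 1) 0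
  simp only [pvP, decide_eq_true_eq, zero_add] at h
  simpa [countSubarrays] using h

lemma pvGetD_cons_shift (x : Int) (xs : List Int) (m : Nat) (d : Int) :
    PySem.List.pyGetD (x :: xs) ((m : Int) + 1) d = PySem.List.pyGetD xs (m : Int) d := by
  rw [show ((m : Int) + 1) = ((m + 1 : Nat) : Int) by push_cast; ring,
      PySem.List.pyGetD_natCast, PySem.List.pyGetD_natCast]
  exact List.getD_cons_succ

lemma pvP_shift (x : Int) (xs : List Int) (k : Nat) :
    pvP (x :: xs) ((k : Int) + 1) = pvP xs (k : Int) := by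
  simp only [pvP, decide_eq_decide]
  rw [show ((k : Int) + 1 + 2) = (((k + 2 : Nat) : Int)) + 1 by push_cast; ring,
      show ((k : Int) + 1 + 1) = (((k + 1 : Nat) : Int)) + 1 by push_cast; ring,
      pvGetD_cons_shift, pvGetD_cons_shift, pvGetD_cons_shift]
  push_cast
  tauto

lemma A_cons (a b c : Int) (rest : List Int) :
    countSubarrays (a :: b :: c :: rest)
      = (if b * 2 = a + c then 1 else 0) + countSubarrays (b :: c :: rest) := by
  rw [A_count, A_count]
  have hlen1 : (((a :: b :: c :: rest).length : Int) - 2 - 0).toNat = rest.length + 1 := by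
    simp; omega
  have hlen2 : (((b :: c :: rest).length : Int) - 2 - 0).toNat = rest.length := by
    simp; omega
  rw [PySem.List.pyRange_one, PySem.List.pyRange_one, hlen1, hlen2,
    List.countP_map, List.countP_map, List.range_succ_eq_map, List.countP_cons, List.countP_map]
  have hstep : ∀ k ∈ List.range rest.length,
      (((pvP (a :: b :: c :: rest)) ∘ (fun k : Nat => (0 : Int) + ↑k)) ∘ Nat.succ) k = true
        ↔ ((pvP (b :: c :: rest)) ∘ (fun k : Nat => (0 : Int) + ↑k)) k = true := by
    intro k _
    simp only [Function.comp_apply, Nat.succ_eq_add_one, zero_add]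
    rw [show ((k + 1 : Nat) : Int) = (k : Int) + 1 by push_cast; ring, pvP_shift]
  rw [List.countP_congr hstep]
  have hp0 : (pvP (a :: b :: c :: rest)) ((0 : Int) + ((0 : Nat) : Int)) = decide (b * 2 = a + c) := by
    norm_num [pvP]
    simp [PySem.List.pyGetD_ofNat', List.getD_eq_getElem?_getD]
  simp only [Function.comp_apply, hp0]
  by_cases hbc : b * 2 = a + c
  · simp [hbc]; ring
  · simp [hbc]

lemma A_small (nums : List Int) (h : nums.length ≤ 2) : countSubarrays nums = 0 := by
  unfold countSubarrays
  rw [PySem.List.pyRange_one_eq_nil (by omega : ((nums.length : Int) - 2) ≤ 0)]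
  rfl

lemma countSubarrays_eq_aux (nums : List Int) : countSubarrays nums = pvAux nums := by
  induction nums using pvAux.induct with
  | case1 a b c rest ih => rw [A_cons, ih, pvAux]
  | case2 x h =>
      rcases x with _|⟨a,_|⟨b,_|⟨c,t⟩⟩⟩
      · rw [A_small _ (by simp)]; rfl
      · rw [A_small _ (by simp)]; rfl
      · rw [A_small _ (by simp)]; rfl
      · exact absurd rfl (h a b c t)

lemma pvSlice1 (xs : List Int) : PySem.List.slice xs (some 1) none = xs.drop 1 :=
  PySem.List.slice_from xs (by omega)

lemma alt_eq_aux (nums : List Int) : countSubarrays_alt nums = pvAux nums := by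
  induction nums using pvAux.induct with
  | case1 a b c rest ih =>
      have hc : ((b - a : Int) = c - b) ↔ (b * 2 = a + c) := by omega
      simp only [countSubarrays_alt, pvSlice1, List.drop_one, List.tail_cons, List.zip_cons_cons,
        List.map_cons, List.sum_cons] at ih ⊢
      rw [pvAux, ← ih]
      simp only [hc]
  | case2 x h =>
      rcases x with _|⟨a,_|⟨b,_|⟨c,t⟩⟩⟩
      · simp [countSubarrays_alt, pvAux]
      · simp [countSubarrays_alt, pvAux, pvSlice1]
      · simp [countSubarrays_alt, pvAux, pvSlice1]
      · exact absurd rfl (h a b c t)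

-- ===== VERDICT (by name: the statement is the Claim_ definition above) =====
theorem countSubarrays_spec : Claim_equal_countSubarrays := by
  intro nums _
  unfold Spec_countSubarrays
  rw [countSubarrays_eq_aux, alt_eq_aux]
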